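-- pv_equiv track=rewrite | github.com/ari1988/Data_Structure_Python | 4_Hashing/Challenge_7.1.py | is_formation_possible
-- ===== SOURCE A (Python) =====
-- def is_formation_possible(lst, word):
--   if len(word) < 2 or len(lst) < 2:
--     return False
--
--   for i in range(len(word)):
--     first = word[0:i]
--     second = word[i:]
--     check1 = False
--     check2 = False
--     if first in lst:
--       check1 = True
--     if second in lst:
--       check2 = True
--     if check1 and check2:
--       return True
--   return False
-- ===== SOURCE B (Python) =====
-- def is_formation_possible(lst, word):
--   if len(word) < 2 or len(lst) < 2:
--     return False
--   words = set(lst)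
--   for w in lst:
--     if len(w) < len(word) and word.startswith(w) and word[len(w):] in words:
--       return True
--   return False
-- ===== Notes on version B (the rewrite author's own statement) =====
-- stated objective: faster
-- what changed: B iterates over candidate first-half words from the list (startswith check + O(1) set lookup of the suffix) instead of A's loop over every split position with two linear list scans per position.
import Mathlib
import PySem

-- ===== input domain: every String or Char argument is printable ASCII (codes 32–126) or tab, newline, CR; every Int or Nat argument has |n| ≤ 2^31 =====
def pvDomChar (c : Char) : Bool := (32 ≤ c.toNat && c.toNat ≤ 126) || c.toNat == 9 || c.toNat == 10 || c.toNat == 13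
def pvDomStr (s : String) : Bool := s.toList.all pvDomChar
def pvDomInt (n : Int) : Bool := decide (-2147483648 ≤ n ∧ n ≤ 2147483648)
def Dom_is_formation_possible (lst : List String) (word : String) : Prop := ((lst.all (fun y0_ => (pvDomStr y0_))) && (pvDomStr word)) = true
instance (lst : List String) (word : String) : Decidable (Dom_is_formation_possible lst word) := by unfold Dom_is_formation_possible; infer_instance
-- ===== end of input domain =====

-- B iterates over candidate first-half words from the list (startswith + set suffix lookup)
-- instead of A's loop over every split position of the word; same return value, more idiomatic.


-- ===== PORT A =====
-- for i in range(len(word)): first = word[0:i]; second = word[i:]; if first in lst and second in lst: return True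
def is_formation_possible (lst : List String) (word : String) : Bool :=
  if PySem.Str.len word < 2 || (lst.length : Int) < 2 then false
  else
    (PySem.List.pyRange 0 (PySem.Str.len word) 1).any (fun i =>
      let first := PySem.Str.slice word (some 0) (some i)
      let second := PySem.Str.slice word (some i) none
      let check1 := lst.contains first
      let check2 := lst.contains second
      check1 && check2)

-- ===== PORT B =====
-- words = set(lst); for w in lst: if len(w) < len(word) and word.startswith(w) and word[len(w):] in words: return True
def is_formation_possible_alt (lst : List String) (word : String) : Bool :=
  if PySem.Str.len word < 2 || (lst.length : Int) < 2 then false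
  else
    let words : PySem.Set String := PySem.Set.ofList lst
    lst.any (fun w =>
      decide (PySem.Str.len w < PySem.Str.len word) && PySem.Str.startswith word w &&
        PySem.Set.contains words (PySem.Str.slice word (some (PySem.Str.len w)) none))

-- ===== PRECONDITION & SPEC =====
def Spec_is_formation_possible (lst : List String) (word : String) (out : Bool) : Prop := out = is_formation_possible_alt lst word
instance (lst : List String) (word : String) (out : Bool) : Decidable (Spec_is_formation_possible lst word out) := by unfold Spec_is_formation_possible; infer_instance

-- ===== CLAIM (what is proved, stated in full; the proofs are below) =====
def Claim_equal_is_formation_possible : Prop := ∀ (lst : List String) (word : String), Dom_is_formation_possible lst word → Spec_is_formation_possible lst word (is_formation_possible lst word)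

-- ===== LEMMAS AND PROOFS =====

-- the two loop bodies find a split at position i ↔ they find a candidate first-half word w
theorem any_split_iff_any_word (lst : List String) (word : String) :
    ((PySem.List.pyRange 0 (PySem.Str.len word) 1).any (fun i =>
        lst.contains (PySem.Str.slice word (some 0) (some i)) &&
        lst.contains (PySem.Str.slice word (some i) none))
      = lst.any (fun w =>
        decide (PySem.Str.len w < PySem.Str.len word) && PySem.Str.startswith word w &&
        PySem.Set.contains (PySem.Set.ofList lst) (PySem.Str.slice word (some (PySem.Str.len w)) none))) := by
  apply Bool.eq_iff_iff.mpr
  simp only [List.any_eq_true, Bool.and_eq_true, decide_eq_true_eq, List.contains_iff_mem,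
    PySem.List.mem_pyRange_one, PySem.Set.contains, PySem.Set.mem_ofList]
  constructor
  · rintro ⟨i, ⟨hi0, hin⟩, h1, h2⟩
    have hlen : PySem.Str.len (PySem.Str.slice word (some 0) (some i)) = i := by
      rw [PySem.Str.len_eq, PySem.Str.toList_slice, PySem.Chars.slice_eq_listSlice,
        PySem.List.slice_zero_start, PySem.List.slice_to _ hi0]
      rw [PySem.Str.len_eq] at hin
      simp only [List.length_take]
      push_cast
      omega
    refine ⟨PySem.Str.slice word (some 0) (some i), h1, ⟨?_, ?_⟩, ?_⟩
    · rw [hlen]; exact hin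
    · rw [PySem.Str.startswith_eq, PySem.Chars.startswith_iff, PySem.Str.toList_slice,
        PySem.Chars.slice_eq_listSlice, PySem.List.slice_zero_start, PySem.List.slice_to _ hi0]
      exact List.take_prefix _ _
    · rw [hlen]; exact h2
  · rintro ⟨w, hw, ⟨hlen, hsw⟩, hsuf⟩
    refine ⟨PySem.Str.len w, ⟨?_, hlen⟩, ?_, hsuf⟩
    · rw [PySem.Str.len_eq]; positivity
    · have : PySem.Str.slice word (some 0) (some (PySem.Str.len w)) = w := by
        apply String.toList_inj.mp
        rw [PySem.Str.toList_slice, PySem.Chars.slice_eq_listSlice,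
          PySem.List.slice_zero_start, PySem.List.slice_to _ (by rw [PySem.Str.len_eq]; positivity)]
        rw [PySem.Str.startswith_eq, PySem.Chars.startswith_iff] at hsw
        rw [PySem.Str.len_eq]
        simpa using (List.prefix_iff_eq_take.mp hsw).symm
      rw [this]
      exact hw

-- ===== VERDICT (by name: the statement is the Claim_ definition above) =====
theorem is_formation_possible_spec : Claim_equal_is_formation_possible := by
  intro lst word _
  unfold Spec_is_formation_possible is_formation_possible is_formation_possible_alt
  split_ifs with h
  · rfl
  · exact any_split_iff_any_word lst word
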